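-- pv_equiv track=rewrite | github.com/radoslav11/acm-sgu | problems/p473/p473.py | solve
-- ===== SOURCE A (Python) =====
-- def solve(K):
--     # Find the smallest positive integer N such that N has exactly K divisors.
--     #
--     # The key insight is that if N = p1^a1 * p2^a2 * ... * pm^am, then
--     # the number of divisors is (a1+1) * (a2+1) * ... * (am+1).
--     #
--     # So we need to find all factorizations of K = b1 * b2 * ... * bm where
--     # each bi >= 2, and then N = p1^(b1-1) * p2^(b2-1) * ... * pm^(bm-1)
--     # where p1, p2, ..., pm are the first m primes.
--     #
--     # We use Python for potentially large integers when K is prime, as the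
--     # answer would be 2^(K-1) which can be astronomically large.
--     #
--     # This approach is fast because there aren't that many factorizations
--     # of a number <= 10^5. In particular, an easy upper bound is the log(K)-th Bell
--     # number equal to ~1e9 for 16. However, this is only possible for K = 2^c, in
--     # which case the factors are the same and if we don't generate them multiple times
--     # we significantly reduce the above figure. For example if K = 2^c a tighter upper
--     # bound for the number of unique factorizations is only 2^(c-1) - think of this as
--     # setting the separators between the groups.
--
--     if K == 1:
--         return 1
--
--     # Generate enough primes (we won't need more than log2(K) primes)
--     # since the smallest factorization would be 2 * 2 * ... * 2
--     max_primes_needed = K.bit_length()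
--     primes = []
--     is_prime = [True] * (max_primes_needed * 10)  # Generous upper bound
--
--     for i in range(2, len(is_prime)):
--         if is_prime[i]:
--             primes.append(i)
--             if len(primes) >= max_primes_needed:
--                 break
--             for j in range(i * i, len(is_prime), i):
--                 is_prime[j] = False
--
--     # Find all ordered factorizations of K using iterative approach
--     # Each factorization represents exponents+1 for our prime factorization
--     factorizations = []
--
--     # Stack: (remaining_value, current_factorization, min_factor)
--     stack = [(K, [], 2)]
--
--     while stack:
--         remaining, current, min_factor = stack.pop()
--
--         if remaining == 1:
--             factorizations.append(current[::-1])
--             continue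
--
--         # Try all factors from min_factor to remaining
--         # This ensures we generate factorizations in non-increasing order
--         for factor in range(min_factor, remaining + 1):
--             q, r = divmod(remaining, factor)
--             if r == 0:
--                 new_current = current + [factor]
--                 stack.append((q, new_current, factor))
--
--     # For each factorization, compute the corresponding N
--     min_n = None
--
--     for factors in factorizations:
--         # factors = [b1, b2, ..., bm] where K = b1 * b2 * ... * bm
--         # N = p1^(b1-1) * p2^(b2-1) * ... * pm^(bm-1)
--
--         assert len(factors) <= len(primes)
--
--         n = 1
--         for i, factor in enumerate(factors):
--             n *= primes[i] ** (factor - 1)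
--
--             # Early termination if n is already too large
--             if min_n is not None and n >= min_n:
--                 break
--
--         if min_n is None or n < min_n:
--             min_n = n
--
--     return min_n
-- ===== SOURCE B (Python) =====
-- def solve(K):
--     # Same answer, but recurse over the divisors of the remaining count
--     # (found by a sqrt scan) instead of scanning every integer up to it,
--     # taking the minimum directly instead of materialising factorizations.
--     if K == 1:
--         return 1
--     PRIMES = [2, 3, 5, 7, 11, 13, 17, 19, 23, 29, 31, 37, 41, 43, 47, 53,
--               59, 61, 67, 71, 73, 79, 83, 89, 97, 101, 103, 107, 109, 113, 127, 131]
--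
--     def best(rem, maxf, i):
--         # minimal N' achieving 'rem' remaining divisor count with next
--         # factor at most maxf, using primes from index i on
--         if rem == 1:
--             return 1
--         res = None
--         divs = []
--         d = 1
--         while d * d <= rem:
--             if rem % d == 0:
--                 divs.append(d)
--                 if d != rem // d:
--                     divs.append(rem // d)
--             d += 1
--         for f in divs:
--             if 2 <= f <= maxf:
--                 sub = best(rem // f, f, i + 1)
--                 if sub is not None:
--                     cand = PRIMES[i] ** (f - 1) * sub
--                     if res is None or cand < res:
--                         res = cand
--         return res
--
--     return best(K, K, 0)
-- ===== Notes on version B (the rewrite author's own statement) =====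
-- stated objective: faster
-- what changed: Replaces the explicit-stack enumeration of all factorizations (scanning every integer from min_factor to remaining at each node) followed by a separate minimisation pass over a sieve-built prime list by a direct recursion that scans only up to sqrt(remaining) to find divisors and folds the minimum N on the fly over a hardcoded table of the 32 primes that can ever be needed for |K| <= 2^31.
-- outside the precondition, e.g. on solve(0): A returns None, B returns None; on solve(-5): A returns None, B returns None
import Mathlib
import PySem

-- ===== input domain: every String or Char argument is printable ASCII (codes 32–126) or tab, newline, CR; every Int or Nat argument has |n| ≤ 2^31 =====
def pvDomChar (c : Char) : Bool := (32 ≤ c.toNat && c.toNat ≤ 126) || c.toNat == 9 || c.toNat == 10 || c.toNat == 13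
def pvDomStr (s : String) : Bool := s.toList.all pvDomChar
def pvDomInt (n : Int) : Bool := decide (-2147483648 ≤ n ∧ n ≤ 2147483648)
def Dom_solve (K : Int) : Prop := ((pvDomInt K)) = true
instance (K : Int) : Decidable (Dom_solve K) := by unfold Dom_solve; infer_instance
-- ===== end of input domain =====

-- B computes the same smallest-N-with-K-divisors by recursing over the divisors of the
-- remaining count (sqrt scan) and folding the minimum directly, instead of A's explicit
-- stack enumerating factorizations by scanning every integer and a separate minimum pass.

-- ===== PORT A =====

-- termination helpers for the ports (cited by decreasing_by; they are about the measures only)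
theorem pv_le_mul_self (d : Int) : d ≤ d * d := by
  by_cases h : d ≤ 0
  · exact le_trans h (mul_self_nonneg d)
  · nlinarith

theorem pv_floordiv_toNat_lt (rem f : Int) (h1 : 1 ≤ rem) (hf : 2 ≤ f) :
    (PySem.Int.floordiv rem f).toNat < rem.toNat := by
  rw [PySem.Int.floordiv_eq_ediv_of_pos (by omega)]
  have hq0 : 0 ≤ rem / f := Int.ediv_nonneg (by omega) (by omega)
  have hmul : f * (rem / f) ≤ rem := by
    have := Int.emod_nonneg rem (show f ≠ 0 by omega)
    have := Int.ediv_add_emod rem f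
    omega
  have h2q : 2 * (rem / f) ≤ rem := by nlinarith
  omega

-- loop shape of the push loop ('for factor: if divisible: stack.append'), used by the
-- termination measure of loopA and by its membership lemma
theorem pv_foldl_cons_if {α β : Type} (p : α → Prop) [DecidablePred p] (g : α → β) :
    ∀ (L : List α) (st : List β),
      L.foldl (fun st f => if p f then g f :: st else st) st
        = ((L.filter (fun x => decide (p x))).map g).reverse ++ st := by
  intro L
  induction L with
  | nil => intro st; simp
  | cons a L ih =>
    intro st
    by_cases h : p a <;> simp [h, ih, List.filter_cons]

-- sieve of Eratosthenes, literal port of A's prime generation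
def markMultiples (isp : List Bool) (i : Int) : List Bool :=
  (PySem.List.pyRange (i * i) (isp.length : Int) i).foldl (fun l j => l.set j.toNat false) isp

def sieveLoop (isp : List Bool) (primes : List Int) (mpn : Nat) : List Int → List Int
  | [] => primes
  | i :: rest =>
    if isp.getD i.toNat true then          -- is_prime[i]; index is always in range here
      let primes' := primes ++ [i]
      if mpn ≤ primes'.length then primes'  -- break
      else sieveLoop (markMultiples isp i) primes' mpn rest
    else sieveLoop isp primes mpn rest

def sievePrimes (mpn : Nat) : List Int :=
  sieveLoop (List.replicate (mpn * 10) true) [] mpn (PySem.List.pyRange 2 ((mpn * 10 : Nat) : Int) 1)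

-- measure bound for loopA's push step (cited by its decreasing_by)
theorem pv_loopA_measure (rem : Int) (cur : List Int) (mf : Int)
    (rest : List (Int × List Int × Int)) (hmf : 2 ≤ mf) :
    (((PySem.List.pyRange mf (rem + 1) 1).foldl
        (fun st f => if PySem.Int.mod rem f = 0 then (PySem.Int.floordiv rem f, cur ++ [f], f) :: st else st)
        rest).map (fun e => 4 ^ e.1.toNat)).sum
      < 4 ^ rem.toNat + (rest.map (fun e => 4 ^ e.1.toNat)).sum := by
  rw [pv_foldl_cons_if (fun f => PySem.Int.mod rem f = 0)
        (fun f => (PySem.Int.floordiv rem f, cur ++ [f], f))]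
  simp only [List.map_append, List.map_reverse, List.sum_append, List.sum_reverse]
  by_cases hr : rem ≤ 1
  · have hnil : PySem.List.pyRange mf (rem + 1) 1 = [] :=
      PySem.List.pyRange_one_eq_nil (by omega)
    have h4 : 0 < 4 ^ rem.toNat := by positivity
    simp only [hnil, List.filter_nil, List.map_nil, List.sum_nil]
    omega
  · have hbound : ∀ x ∈ (((PySem.List.pyRange mf (rem + 1) 1).filter
        (fun x => decide (PySem.Int.mod rem x = 0))).map
        (fun f => (PySem.Int.floordiv rem f, cur ++ [f], f))).map (fun e => 4 ^ e.1.toNat),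
        x ≤ 2 ^ rem.toNat := by
      intro x hx
      rcases List.mem_map.1 hx with ⟨e, he, rfl⟩
      rcases List.mem_map.1 he with ⟨f, hf, rfl⟩
      have hmem := (PySem.List.mem_pyRange_one).1 (List.mem_filter.1 hf).1
      have hdvd : f ∣ rem := (PySem.Int.mod_eq_zero_iff_dvd rem f).1
        (by simpa using (List.mem_filter.1 hf).2)
      have hf2 : 2 ≤ f := by omega
      simp only
      rw [PySem.Int.floordiv_eq_ediv_of_pos (by omega)]
      have hq0 : 0 ≤ rem / f := Int.ediv_nonneg (by omega) (by omega)
      have hmul : f * (rem / f) ≤ rem := by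
        have := Int.emod_nonneg rem (show f ≠ 0 by omega)
        have := Int.mul_ediv_add_emod rem f
        omega
      have h2q : 2 * (rem / f) ≤ rem := by nlinarith
      calc (4:Nat) ^ (rem / f).toNat = 2 ^ (2 * (rem / f).toNat) := by
            rw [pow_mul]; norm_num
        _ ≤ 2 ^ rem.toNat := Nat.pow_le_pow_right (by norm_num) (by omega)
    have hlen : (((PySem.List.pyRange mf (rem + 1) 1).filter
        (fun x => decide (PySem.Int.mod rem x = 0))).map
        (fun f => (PySem.Int.floordiv rem f, cur ++ [f], f))).length ≤ rem.toNat - 1 := by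
      simp only [List.length_map]
      calc ((PySem.List.pyRange mf (rem + 1) 1).filter
            (fun x => decide (PySem.Int.mod rem x = 0))).length
          ≤ (PySem.List.pyRange mf (rem + 1) 1).length := List.length_filter_le _ _
        _ = (rem + 1 - mf).toNat := PySem.List.length_pyRange_one mf (rem + 1)
        _ ≤ rem.toNat - 1 := by omega
    have hsum := List.sum_le_card_nsmul _ _ hbound
    have hmain : ((((PySem.List.pyRange mf (rem + 1) 1).filter
        (fun x => decide (PySem.Int.mod rem x = 0))).map
        (fun f => (PySem.Int.floordiv rem f, cur ++ [f], f))).map (fun e => 4 ^ e.1.toNat)).sum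
        < 4 ^ rem.toNat := by
      have h2k : rem.toNat - 1 < 2 ^ rem.toNat :=
        lt_of_le_of_lt (by omega) (Nat.lt_two_pow_self)
      calc _ ≤ _ := hsum
        _ ≤ (rem.toNat - 1) * 2 ^ rem.toNat := by
            rw [smul_eq_mul, List.length_map]
            exact Nat.mul_le_mul_right _ (by simpa using hlen)
        _ < 2 ^ rem.toNat * 2 ^ rem.toNat :=
            Nat.mul_lt_mul_of_lt_of_le h2k (le_refl _) (by positivity)
        _ = 4 ^ rem.toNat := by
            rw [show (4:Nat) = 2 * 2 by norm_num, mul_pow]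
    omega

-- the explicit stack loop of A; entries are (remaining, current, min_factor).
-- The stack invariant 2 ≤ min_factor (true of everything A ever pushes) is carried as a
-- hypothesis so the loop is total; computationally this is exactly A's while loop
-- (push order, pop order and the produced list are identical).
def loopA (s : List (Int × List Int × Int)) (acc : List (List Int))
    (h : ∀ e ∈ s, 2 ≤ e.2.2) : List (List Int) :=
  match hs : s with
  | [] => acc
  | (rem, cur, mf) :: rest =>
    if rem = 1 then
      loopA rest (acc ++ [cur.reverse]) (by intro e he; exact h e (by simp [hs, he]))
    else
      loopA ((PySem.List.pyRange mf (rem + 1) 1).foldl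
          (fun st f => if PySem.Int.mod rem f = 0 then (PySem.Int.floordiv rem f, cur ++ [f], f) :: st else st) rest)
        acc
        (by
          intro e he
          rw [pv_foldl_cons_if (fun f => PySem.Int.mod rem f = 0)
                (fun f => (PySem.Int.floordiv rem f, cur ++ [f], f))] at he
          rcases List.mem_append.1 he with he | he
          · rcases List.mem_reverse.1 he with he
            rcases List.mem_map.1 he with ⟨f, hf, rfl⟩
            have hmf : 2 ≤ mf := h (rem, cur, mf) (by simp [hs])
            have := (PySem.List.mem_pyRange_one).1 (List.mem_filter.1 hf).1
            simpa using by omega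
          · exact h e (by simp [hs, he]))
termination_by (s.map (fun e => 4 ^ e.1.toNat)).sum
decreasing_by
  · simp [hs]
  · simp only [dite_eq_ite, hs, List.map_cons, List.sum_cons]
    exact pv_loopA_measure rem cur mf rest (h (rem, cur, mf) (by simp [hs]))

-- phase 2 of A: for each factorization multiply primes[i]^(b_i-1) with early break,
-- then update the running minimum
def innerLoop (primes : List Int) (minn : Option Int) (n : Int) (i : Nat) : List Int → Int
  | [] => n
  | f :: rest =>
    let n' := n * (primes.getD i 0) ^ (f - 1).toNat   -- primes[i] is in range and f ≥ 2 whenever reached (proved below)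
    if (match minn with | some m => decide (m ≤ n') | none => false) then n'  -- break
    else innerLoop primes minn n' (i + 1) rest

def outerLoop (primes : List Int) (minn : Option Int) : List (List Int) → Option Int
  | [] => minn
  | fs :: rest =>
    let n := innerLoop primes minn 1 0 fs
    outerLoop primes (match minn with | none => some n | some m => if n < m then some n else some m) rest

-- A's 'assert len(factors) <= len(primes)' never fires on Pre_ inputs (proved below); Python
-- returns None only for K ≤ 0 (excluded by Pre_), ported as .getD 0.
def solve (K : Int) : Int :=
  if K = 1 then 1
  else
    let mpn := PySem.Int.bitLength K        -- K.bit_length()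
    let primes := sievePrimes mpn
    let facts := loopA [(K, ([] : List Int), (2 : Int))] [] (by intro e he; simp at he; simp [he])
    (outerLoop primes none facts).getD 0

-- ===== PORT B =====

def P32 : List Int :=
  [2, 3, 5, 7, 11, 13, 17, 19, 23, 29, 31, 37, 41, 43, 47, 53,
   59, 61, 67, 71, 73, 79, 83, 89, 97, 101, 103, 107, 109, 113, 127, 131]

-- the sqrt divisor scan of B ('while d*d <= rem'), in append order d, rem//d
def divScan (rem d : Int) : List Int :=
  if rem < d * d then []
  else
    (if PySem.Int.mod rem d = 0 then
       d :: (if d ≠ PySem.Int.floordiv rem d then [PySem.Int.floordiv rem d] else [])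
     else []) ++ divScan rem (d + 1)
termination_by (rem + 1 - d).toNat
decreasing_by
  have h1 := pv_le_mul_self d
  have h2 : 0 ≤ d * d := mul_self_nonneg d
  omega

-- membership in the scan forces a positive remaining value (termination helper)
theorem divScan_pos (rem d x : Int) (hx : x ∈ divScan rem d) (hd : 1 ≤ d) : 1 ≤ rem := by
  by_contra hr
  rw [divScan.eq_def] at hx
  have hdd : 1 ≤ d * d := by nlinarith
  rw [if_pos (by omega)] at hx
  simp at hx

mutual
  -- B's recursion: minimal N for 'rem' remaining divisor count, next factor ≤ maxf,
  -- primes used from index i on; None = no factorization possible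
  def bestOpt (rem maxf : Int) (i : Nat) : Option Int :=
    if rem = 1 then some 1
    else bestLoop rem maxf i (divScan rem 1).attach none
  termination_by (rem.toNat, 1, 0)
  decreasing_by exact Prod.Lex.right _ (Prod.Lex.left _ _ (by omega))

  -- the 'for f in divs' loop of B
  def bestLoop (rem maxf : Int) (i : Nat)
      (ds : List {x // x ∈ divScan rem 1}) (res : Option Int) : Option Int :=
    match ds with
    | [] => res
    | f :: rest =>
      if h : 2 ≤ f.1 ∧ f.1 ≤ maxf then
        match bestOpt (PySem.Int.floordiv rem f.1) f.1 (i + 1) with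
        | none => bestLoop rem maxf i rest res
        | some s =>
          let cand := (P32.getD i 0) ^ (f.1 - 1).toNat * s   -- PRIMES[i]; i < 32 whenever reached
          bestLoop rem maxf i rest
            (match res with
             | none => some cand
             | some m => if cand < m then some cand else some m)  -- res is 'some m' here
      else bestLoop rem maxf i rest res
  termination_by (rem.toNat, 0, ds.length)
  decreasing_by
    · exact Prod.Lex.left _ _ (pv_floordiv_toNat_lt rem f.1 (divScan_pos rem 1 f.1 f.2 (by norm_num)) h.1)
    · exact Prod.Lex.right _ (Prod.Lex.right _ (by simp))
    · exact Prod.Lex.right _ (Prod.Lex.right _ (by simp))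
    · exact Prod.Lex.right _ (Prod.Lex.right _ (by simp))
end

def solve_alt (K : Int) : Int :=
  if K = 1 then 1
  else (bestOpt K K 0).getD 0   -- None only for K ≤ 0 (excluded by Pre_)

-- ===== PRECONDITION & SPEC =====
-- Pre_ excludes K ≤ 0, where A (and B) return None instead of an int.
def Pre_solve (K : Int) : Prop := 1 ≤ K
instance (K : Int) : Decidable (Pre_solve K) := by unfold Pre_solve; infer_instance
def pvWitness_solve : Int := 6

def Spec_solve (K : Int) (out : Int) : Prop := out = solve_alt K
instance (K : Int) (out : Int) : Decidable (Spec_solve K out) := by unfold Spec_solve; infer_instance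

-- ===== CLAIM (what is proved, stated in full; the proofs are below) =====
def Claim_equal_solve : Prop := ∀ (K : Int), Dom_solve K → Pre_solve K → Spec_solve K (solve K)

-- ===== LEMMAS AND PROOFS =====

-- ---------- generic arithmetic / list facts ----------

theorem pv_one_le_prod : ∀ l : List Int, (∀ y ∈ l, 1 ≤ y) → 1 ≤ l.prod := by
  intro l
  induction l with
  | nil => simp
  | cons a t ih =>
    intro h
    have ha : 1 ≤ a := h a (by simp)
    have ht : 1 ≤ t.prod := ih (fun y hy => h y (by simp [hy]))
    have : 1 ≤ a * t.prod := by nlinarith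
    simpa using this

theorem pv_elem_le_prod : ∀ l : List Int, (∀ y ∈ l, 1 ≤ y) → ∀ y ∈ l, y ≤ l.prod := by
  intro l
  induction l with
  | nil => simp
  | cons a t ih =>
    intro h y hy
    have ha : 1 ≤ a := h a (by simp)
    have ht : 1 ≤ t.prod := pv_one_le_prod t (fun z hz => h z (by simp [hz]))
    rcases List.mem_cons.1 hy with rfl | hy
    · simpa using le_mul_of_one_le_right (by omega) ht
    · have := ih (fun z hz => h z (by simp [hz])) y hy
      calc y ≤ t.prod := this
        _ ≤ a * t.prod := le_mul_of_one_le_left (by omega) ha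
        _ = (a :: t).prod := by simp

theorem pv_two_pow_len_le_prod : ∀ l : List Int, (∀ y ∈ l, 2 ≤ y) → 2 ^ l.length ≤ l.prod := by
  intro l
  induction l with
  | nil => simp
  | cons a t ih =>
    intro h
    have ha : 2 ≤ a := h a (by simp)
    have ht := ih (fun z hz => h z (by simp [hz]))
    have hp : (0:Int) < 2 ^ t.length := by positivity
    calc (2:Int) ^ (a :: t).length = 2 * 2 ^ t.length := by rw [List.length_cons, pow_succ]; ring
      _ ≤ a * t.prod := mul_le_mul ha ht (le_of_lt hp) (by omega)
      _ = (a :: t).prod := by simp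

-- ---------- minimum specifications ----------

def MinSpec (P : Int → Prop) : Option Int → Prop
  | none => ∀ x, ¬ P x
  | some a => P a ∧ ∀ x, P x → a ≤ x

def optMin (r : Option Int) (v : Int) : Option Int :=
  match r with
  | none => some v
  | some m => if v < m then some v else some m

theorem minSpec_unique {P : Int → Prop} {r r' : Option Int}
    (h : MinSpec P r) (h' : MinSpec P r') : r = r' := by
  cases r with
  | none =>
    cases r' with
    | none => rfl
    | some a => exact absurd h'.1 (h a)
  | some a =>
    cases r' with
    | none => exact absurd h.1 (h' a)
    | some b => simpa using le_antisymm (h.2 b h'.1) (h'.2 a h.1)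

theorem minSpec_iff {P Q : Int → Prop} {r : Option Int}
    (h : ∀ x, P x ↔ Q x) (hm : MinSpec P r) : MinSpec Q r := by
  cases r with
  | none => intro x hq; exact hm x ((h x).2 hq)
  | some a => exact ⟨(h a).1 hm.1, fun x hq => hm.2 x ((h x).2 hq)⟩

theorem minSpec_optMin {P : Int → Prop} {r : Option Int} {v : Int}
    (h : MinSpec P r) : MinSpec (fun x => P x ∨ x = v) (optMin r v) := by
  cases r with
  | none =>
    refine ⟨Or.inr rfl, ?_⟩
    rintro x (hx | rfl)
    · exact absurd hx (h x)
    · exact le_refl _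
  | some m =>
    rcases h with ⟨hm, hmin⟩
    by_cases hv : v < m
    · simp only [optMin, if_pos hv]
      refine ⟨Or.inr rfl, ?_⟩
      rintro x (hx | rfl)
      · exact le_trans (le_of_lt hv) (hmin x hx)
      · exact le_refl _
    · simp only [optMin, if_neg hv]
      refine ⟨Or.inl hm, ?_⟩
      rintro x (hx | rfl)
      · exact hmin x hx
      · omega

theorem minSpec_or_empty {P Q : Int → Prop} {r : Option Int}
    (hq : ∀ x, ¬ Q x) (h : MinSpec P r) : MinSpec (fun x => P x ∨ Q x) r := by
  refine minSpec_iff (fun x => ?_) h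
  constructor
  · exact fun hp => Or.inl hp
  · rintro (hp | hx)
    · exact hp
    · exact absurd hx (hq x)

theorem minSpec_combine {P Q : Int → Prop} {r : Option Int} {v : Int}
    (h : MinSpec P r) (hq : MinSpec Q (some v)) : MinSpec (fun x => P x ∨ Q x) (optMin r v) := by
  rcases hq with ⟨hv, hmin⟩
  cases r with
  | none =>
    refine ⟨Or.inr hv, ?_⟩
    rintro x (hx | hx)
    · exact absurd hx (h x)
    · exact hmin x hx
  | some m =>
    rcases h with ⟨hm, hminP⟩
    by_cases hvm : v < m
    · simp only [optMin, if_pos hvm]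
      refine ⟨Or.inr hv, ?_⟩
      rintro x (hx | hx)
      · exact le_trans (le_of_lt hvm) (hminP x hx)
      · exact hmin x hx
    · simp only [optMin, if_neg hvm]
      refine ⟨Or.inl hm, ?_⟩
      rintro x (hx | hx)
      · exact hminP x hx
      · exact le_trans (by omega) (hmin x hx)

theorem minSpec_scale {P : Int → Prop} {s : Int} (c : Int) (hc : 0 ≤ c)
    (h : MinSpec P (some s)) :
    MinSpec (fun x => ∃ y, P y ∧ x = c * y) (some (c * s)) := by
  rcases h with ⟨hs, hmin⟩
  refine ⟨⟨s, hs, rfl⟩, ?_⟩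
  rintro x ⟨y, hy, rfl⟩
  exact mul_le_mul_of_nonneg_left (hmin y hy) hc

-- ---------- the common value function ----------

def valP (primes : List Int) : Nat → List Int → Int
  | _, [] => 1
  | i, f :: rest => (primes.getD i 0) ^ (f - 1).toNat * valP primes (i + 1) rest

theorem valP_pos (primes : List Int) :
    ∀ (fs : List Int) (i : Nat), (∀ j, j < fs.length → 1 ≤ primes.getD (i + j) 0) →
      1 ≤ valP primes i fs := by
  intro fs
  induction fs with
  | nil => intro i _; simp [valP]
  | cons f rest ih =>
    intro i h
    have hp : 1 ≤ primes.getD i 0 := by simpa using h 0 (by simp)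
    have hpe : 1 ≤ primes.getD i 0 ^ (f - 1).toNat := one_le_pow₀ hp
    have hrest : 1 ≤ valP primes (i + 1) rest := by
      refine ih (i + 1) (fun j hj => ?_)
      have := h (j + 1) (by simpa using hj)
      simpa [Nat.add_assoc, Nat.add_comm 1 j] using this
    simp only [valP]
    nlinarith

theorem pv_P32_getD_pos : ∀ j : Nat, j < 32 → 1 ≤ P32.getD j 0 := by decide

theorem pv_P32_getD_nonneg : ∀ i : Nat, 0 ≤ P32.getD i 0 := by
  intro i
  by_cases hi : i < 32
  · exact le_trans (by norm_num) (pv_P32_getD_pos i hi)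
  · rw [List.getD_eq_default]
    simp [P32]
    omega

theorem pv_take_getD (b j : Nat) (hj : j < b) :
    (P32.take b).getD j 0 = P32.getD j 0 := by
  simp [List.getD_eq_getElem?_getD, List.getElem?_take, hj]

theorem pv_valP_take : ∀ (fs : List Int) (i : Nat) (b : Nat), i + fs.length ≤ b →
    valP (P32.take b) i fs = valP P32 i fs := by
  intro fs
  induction fs with
  | nil => intro i b _; simp [valP]
  | cons f rest ih =>
    intro i b h
    simp only [List.length_cons] at h
    rw [valP, valP, pv_take_getD b i (by omega), ih (i + 1) b (by omega)]

-- ---------- A side: phase 2 is a fold of the running minimum ----------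

theorem innerLoop_facts (primes : List Int) :
    ∀ (fs : List Int) (minn : Option Int) (n : Int) (i : Nat),
      (∀ j, j < fs.length → 1 ≤ primes.getD (i + j) 0) → 1 ≤ n →
      innerLoop primes minn n i fs ≤ n * valP primes i fs
      ∧ (minn = none → innerLoop primes minn n i fs = n * valP primes i fs)
      ∧ (∀ m, minn = some m →
          innerLoop primes minn n i fs = n * valP primes i fs ∨ m ≤ innerLoop primes minn n i fs) := by
  intro fs
  induction fs with
  | nil =>
    intro minn n i _ _
    refine ⟨by simp [innerLoop, valP], by intro _; simp [innerLoop, valP], ?_⟩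
    intro m _
    left; simp [innerLoop, valP]
  | cons f rest ih =>
    intro minn n i h hn
    have hp : 1 ≤ primes.getD i 0 := by simpa using h 0 (by simp)
    have hpe : 1 ≤ primes.getD i 0 ^ (f - 1).toNat := one_le_pow₀ hp
    have hn' : 1 ≤ n * primes.getD i 0 ^ (f - 1).toNat := by nlinarith
    have hshift : ∀ j, j < rest.length → 1 ≤ primes.getD (i + 1 + j) 0 := by
      intro j hj
      have := h (j + 1) (by simpa using hj)
      simpa [Nat.add_assoc, Nat.add_comm 1 j] using this
    have hrestpos : 1 ≤ valP primes (i + 1) rest := valP_pos primes rest (i + 1) hshift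
    have hval : n * valP primes i (f :: rest)
        = (n * primes.getD i 0 ^ (f - 1).toNat) * valP primes (i + 1) rest := by
      simp only [valP]; ring
    have IH := ih minn (n * primes.getD i 0 ^ (f - 1).toNat) (i + 1) hshift hn'
    cases minn with
    | none =>
      have hif : innerLoop primes none n i (f :: rest)
          = innerLoop primes none (n * primes.getD i 0 ^ (f - 1).toNat) (i + 1) rest := by
        simp [innerLoop]
      refine ⟨?_, ?_, ?_⟩
      · rw [hif, hval]; exact IH.1
      · intro _; rw [hif, hval]; exact IH.2.1 rfl
      · intro m hm; exact absurd hm (by simp)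
    | some m =>
      by_cases hc : m ≤ n * primes.getD i 0 ^ (f - 1).toNat
      · have hif : innerLoop primes (some m) n i (f :: rest)
            = n * primes.getD i 0 ^ (f - 1).toNat := by
          simp only [innerLoop]
          rw [if_pos (by exact decide_eq_true hc)]
        refine ⟨?_, ?_, ?_⟩
        · rw [hif, hval]
          exact le_mul_of_one_le_right (by nlinarith) hrestpos
        · intro hnone; exact absurd hnone (by simp)
        · intro m' hm'
          right
          rw [hif]
          have : m' = m := (Option.some.inj hm').symm
          omega
      · have hif : innerLoop primes (some m) n i (f :: rest)
            = innerLoop primes (some m) (n * primes.getD i 0 ^ (f - 1).toNat) (i + 1) rest := by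
          simp only [innerLoop]
          rw [if_neg (by exact fun hcc => hc (of_decide_eq_true hcc))]
        refine ⟨?_, ?_, ?_⟩
        · rw [hif, hval]; exact IH.1
        · intro hnone; exact absurd hnone (by simp)
        · intro m' hm'
          have hmm : m' = m := (Option.some.inj hm').symm
          subst hmm
          rw [hif, hval]
          exact IH.2.2 m' rfl

theorem outerLoop_minspec (primes : List Int)
    (Hpos : ∀ j, j < primes.length → 1 ≤ primes.getD j 0) :
    ∀ (facts : List (List Int)) (minn : Option Int) (P0 : Int → Prop),
      (∀ fs ∈ facts, fs.length ≤ primes.length) → MinSpec P0 minn →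
      MinSpec (fun x => P0 x ∨ ∃ fs ∈ facts, x = valP primes 0 fs) (outerLoop primes minn facts) := by
  intro facts
  induction facts with
  | nil =>
    intro minn P0 _ h0
    refine minSpec_or_empty (by simp) ?_
    simpa [outerLoop] using h0
  | cons fs rest ih =>
    intro minn P0 hlen h0
    have hfs : ∀ j, j < fs.length → 1 ≤ primes.getD (0 + j) 0 := by
      intro j hj
      simpa using Hpos j (lt_of_lt_of_le hj (hlen fs (by simp)))
    have hfacts := innerLoop_facts primes fs minn 1 0 hfs (by norm_num)
    set v := valP primes 0 fs with hv
    have hstep : outerLoop primes minn (fs :: rest)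
        = outerLoop primes (optMin minn v)  rest := by
      cases minn with
      | none =>
        have : innerLoop primes none 1 0 fs = v := by simpa using hfacts.2.1 rfl
        simp [outerLoop, optMin, this]
      | some m =>
        rcases hfacts.2.2 m rfl with heq | hge
        · simp only [one_mul] at heq
          by_cases hnm : innerLoop primes (some m) 1 0 fs < m
          · simp [outerLoop, optMin, heq ▸ hnm, heq]
          · have : ¬ v < m := by rw [← heq]; exact hnm
            simp [outerLoop, optMin, hnm, this]
        · have h1 : ¬ innerLoop primes (some m) 1 0 fs < m := by omega
          have h2 : ¬ v < m := by
            have := hfacts.1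
            simp only [one_mul] at this
            omega
          simp [outerLoop, optMin, h1, h2]
    rw [hstep]
    have hnext := ih (optMin minn v) (fun x => P0 x ∨ x = v)
      (fun gs hgs => hlen gs (by simp [hgs])) (minSpec_optMin h0)
    refine minSpec_iff (fun x => ?_) hnext
    simp only [List.mem_cons]
    constructor
    · rintro ((hp | rfl) | ⟨gs, hgs, rfl⟩)
      · exact Or.inl hp
      · exact Or.inr ⟨fs, Or.inl rfl, rfl⟩
      · exact Or.inr ⟨gs, Or.inr hgs, rfl⟩
    · rintro (hp | ⟨gs, (rfl | hgs), rfl⟩)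
      · exact Or.inl (Or.inl hp)
      · exact Or.inl (Or.inr rfl)
      · exact Or.inr ⟨gs, hgs, rfl⟩

-- ---------- A side: what the stack loop produces ----------

def GoodT (mf rem : Int) (t : List Int) : Prop :=
  t.prod = rem ∧ t.Pairwise (· ≤ ·) ∧ ∀ y ∈ t, mf ≤ y

-- popping one stack entry contributes exactly its factorizations with head factor split off
theorem goodT_step (rem : Int) (cur : List Int) (mf : Int) (x : List Int)
    (hmf : 2 ≤ mf) (hrem : rem ≠ 1) :
    (∃ f, (f ∈ PySem.List.pyRange mf (rem + 1) 1 ∧ PySem.Int.mod rem f = 0) ∧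
        ∃ t, GoodT f (PySem.Int.floordiv rem f) t ∧ x = ((cur ++ [f]) ++ t).reverse)
    ↔ (∃ t, GoodT mf rem t ∧ x = (cur ++ t).reverse) := by
  constructor
  · rintro ⟨f, ⟨hfr, hfm⟩, t, ⟨hprod, hpw, hall⟩, rfl⟩
    have hr := (PySem.List.mem_pyRange_one).1 hfr
    have hdvd : f ∣ rem := (PySem.Int.mod_eq_zero_iff_dvd rem f).1 hfm
    have hf0 : (0:Int) < f := by omega
    rw [PySem.Int.floordiv_eq_ediv_of_pos hf0] at hprod
    refine ⟨f :: t, ⟨?_, ?_, ?_⟩, by simp⟩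
    · rw [List.prod_cons, hprod]
      exact Int.mul_ediv_cancel' hdvd
    · exact List.pairwise_cons.2 ⟨fun y hy => hall y hy, hpw⟩
    · intro y hy
      rcases List.mem_cons.1 hy with rfl | hy
      · omega
      · have := hall y hy; omega
  · rintro ⟨t, ⟨hprod, hpw, hall⟩, rfl⟩
    cases t with
    | nil => simp at hprod; omega
    | cons f t' =>
      have hf : mf ≤ f := hall f (by simp)
      have hall' : ∀ y ∈ t', f ≤ y := (List.pairwise_cons.1 hpw).1
      have hp' : 1 ≤ t'.prod := pv_one_le_prod t' (fun z hz => by have := hall z (by simp [hz]); omega)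
      rw [List.prod_cons] at hprod
      have hdvd : f ∣ rem := ⟨t'.prod, hprod.symm⟩
      have hrem2 : 2 ≤ rem := by nlinarith
      have hfr : f ≤ rem := Int.le_of_dvd (by omega) hdvd
      have hfdiv : PySem.Int.floordiv rem f = t'.prod := by
        rw [PySem.Int.floordiv_eq_ediv_of_pos (by omega : (0:Int) < f), ← hprod]
        exact Int.mul_ediv_cancel_left t'.prod (by omega)
      refine ⟨f, ⟨(PySem.List.mem_pyRange_one).2 ⟨hf, by omega⟩,
          (PySem.Int.mod_eq_zero_iff_dvd rem f).2 hdvd⟩, t', ⟨?_, ?_, ?_⟩, by simp⟩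
      · rw [hfdiv]
      · exact (List.pairwise_cons.1 hpw).2
      · exact hall'

theorem goodT_one (mf : Int) (hmf : 2 ≤ mf) (t : List Int) : GoodT mf 1 t ↔ t = [] := by
  constructor
  · rintro ⟨hprod, _, hall⟩
    cases t with
    | nil => rfl
    | cons a t' =>
      have ha : 2 ≤ a := by have := hall a (by simp); omega
      have hp' : 1 ≤ t'.prod := pv_one_le_prod t' (fun z hz => by have := hall z (by simp [hz]); omega)
      rw [List.prod_cons] at hprod
      nlinarith
  · rintro rfl
    exact ⟨rfl, List.Pairwise.nil, by simp⟩

theorem loopA_mem : ∀ (s : List (Int × List Int × Int)) (acc : List (List Int))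
    (h : ∀ e ∈ s, 2 ≤ e.2.2) (x : List Int),
    x ∈ loopA s acc h ↔ x ∈ acc ∨ ∃ e ∈ s, ∃ t, GoodT e.2.2 e.1 t ∧ x = (e.2.1 ++ t).reverse := by
  intro s acc h
  induction s, acc, h using loopA.induct with
  | case1 acc h => intro x; simp [loopA]
  | case2 acc cur mf rest h h' ih =>
    intro x
    have hmf : 2 ≤ mf := h (1, cur, mf) (by simp)
    rw [loopA]
    rw [if_pos rfl]
    have hacc : cur.attach.reverse.unattach = cur.reverse := by simp
    rw [hacc] at ih
    refine Iff.trans (ih x) ?_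
    simp only [List.mem_append, List.mem_singleton, List.mem_cons]
    constructor
    · rintro ((hx | hx) | ⟨e, he, t, hG, hxe⟩)
      · exact Or.inl hx
      · exact Or.inr ⟨(1, cur, mf), Or.inl rfl, [], (goodT_one mf hmf []).2 rfl, by simpa using hx⟩
      · exact Or.inr ⟨e, Or.inr he, t, hG, hxe⟩
    · rintro (hx | ⟨e, (rfl | he), t, hG, hxe⟩)
      · exact Or.inl (Or.inl hx)
      · have ht : t = [] := (goodT_one mf hmf t).1 hG
        subst ht
        exact Or.inl (Or.inr (by simpa using hxe))
      · exact Or.inr ⟨e, he, t, hG, hxe⟩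
  | case3 acc rem cur mf rest h hrem h' ih =>
    intro x
    have hmf : 2 ≤ mf := h (rem, cur, mf) (by simp)
    rw [loopA]
    rw [if_neg hrem]
    refine Iff.trans (ih x) ?_
    simp only [dite_eq_ite]
    rw [pv_foldl_cons_if (fun f => PySem.Int.mod rem f = 0)
          (fun f => (PySem.Int.floordiv rem f, cur ++ [f], f))]
    simp only [List.mem_append, List.mem_reverse, List.mem_map, List.mem_filter,
      List.mem_cons, decide_eq_true_eq]
    constructor
    · rintro (hx | ⟨e, (⟨f, ⟨hfr, hfm⟩, rfl⟩ | he), t, hG, hxe⟩)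
      · exact Or.inl hx
      · refine Or.inr ⟨(rem, cur, mf), Or.inl rfl, ?_⟩
        exact (goodT_step rem cur mf x hmf hrem).1 ⟨f, ⟨hfr, hfm⟩, t, hG, hxe⟩
      · exact Or.inr ⟨e, Or.inr he, t, hG, hxe⟩
    · rintro (hx | ⟨e, (rfl | he), t, hG, hxe⟩)
      · exact Or.inl hx
      · rcases (goodT_step rem cur mf x hmf hrem).2 ⟨t, hG, hxe⟩ with ⟨f, ⟨hfr, hfm⟩, t', hG', hxe'⟩
        exact Or.inr ⟨(PySem.Int.floordiv rem f, cur ++ [f], f), Or.inl ⟨f, ⟨hfr, hfm⟩, rfl⟩, t', hG', hxe'⟩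
      · exact Or.inr ⟨e, Or.inr he, t, hG, hxe⟩

-- ---------- B side ----------

def VB (rem maxf : Int) (i : Nat) (x : Int) : Prop :=
  ∃ f : List Int, f.prod = rem ∧ f.Pairwise (fun a b => b ≤ a) ∧ (∀ y ∈ f, 2 ≤ y ∧ y ≤ maxf)
    ∧ x = valP P32 i f

def QB (rem maxf : Int) (i : Nat) (f x : Int) : Prop :=
  (2 ≤ f ∧ f ≤ maxf) ∧ ∃ y, VB (PySem.Int.floordiv rem f) f (i + 1) y
    ∧ x = (P32.getD i 0) ^ (f - 1).toNat * y

theorem divScan_mem : ∀ (rem d : Int), 1 ≤ d → ∀ x,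
    (x ∈ divScan rem d ↔ x ∣ rem ∧ d ≤ x ∧ x * d ≤ rem) := by
  intro rem d
  induction d using divScan.induct rem with
  | case1 d h =>
    intro hd x
    rw [divScan.eq_def, if_pos h]
    simp only [List.not_mem_nil, false_iff]
    rintro ⟨_, hdx, hxd⟩
    nlinarith
  | case2 d h ih =>
    intro hd x
    have hd0 : (0:Int) < d := by omega
    have hdd : d * d ≤ rem := not_lt.1 h
    rw [divScan.eq_def, if_neg h]
    rw [List.mem_append]
    have IH := ih (by omega) x
    constructor
    · rintro (hx | hx)
      · by_cases hmod : PySem.Int.mod rem d = 0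
        · have hdvd : d ∣ rem := (PySem.Int.mod_eq_zero_iff_dvd rem d).1 hmod
          rw [if_pos hmod] at hx
          rcases List.mem_cons.1 hx with rfl | hx2
          · exact ⟨hdvd, le_refl _, hdd⟩
          · have hfd : x = PySem.Int.floordiv rem d := by
              by_cases hne : d ≠ PySem.Int.floordiv rem d
              · rw [if_pos hne] at hx2; simpa using hx2
              · rw [if_neg hne] at hx2; simp at hx2
            rw [PySem.Int.floordiv_eq_ediv_of_pos hd0] at hfd
            subst hfd
            refine ⟨⟨d, (Int.ediv_mul_cancel hdvd).symm⟩, ?_, ?_⟩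
            · exact (Int.le_ediv_iff_mul_le hd0).2 hdd
            · exact le_of_eq (Int.ediv_mul_cancel hdvd)
        · rw [if_neg hmod] at hx; simp at hx
      · rcases IH.1 hx with ⟨hdvd, hdx, hxd⟩
        refine ⟨hdvd, by omega, ?_⟩
        nlinarith
    · rintro ⟨hdvd, hdx, hxd⟩
      by_cases hxe : x = d
      · subst hxe
        left
        rw [if_pos ((PySem.Int.mod_eq_zero_iff_dvd rem x).2 hdvd)]
        exact List.mem_cons_self
      · have hdx1 : d + 1 ≤ x := by omega
        by_cases hx1 : x * (d + 1) ≤ rem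
        · exact Or.inr (IH.2 ⟨hdvd, hdx1, hx1⟩)
        · rcases hdvd with ⟨t, ht⟩
          have hx0 : (0:Int) < x := by omega
          have htd : t = d := by
            have h1 : x * d ≤ x * t := by rw [← ht]; exact hxd
            have h2 : x * t < x * (d + 1) := by rw [← ht]; omega
            have := le_of_mul_le_mul_left h1 hx0
            have := lt_of_mul_lt_mul_left h2 (le_of_lt hx0)
            omega
          rw [htd] at ht
          left
          have hmod : PySem.Int.mod rem d = 0 :=
            (PySem.Int.mod_eq_zero_iff_dvd rem d).2 ⟨x, by rw [ht, mul_comm]⟩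
          rw [if_pos hmod]
          have hfd : PySem.Int.floordiv rem d = x := by
            rw [PySem.Int.floordiv_eq_ediv_of_pos hd0, ht]
            exact Int.mul_ediv_cancel x (by omega)
          have hne : d ≠ PySem.Int.floordiv rem d := by
            rw [hfd]; exact fun hh => hxe hh.symm
          rw [if_pos hne, hfd]
          simp

theorem bestLoop_aux (rem maxf : Int) (i : Nat)
    (IH : ∀ (rem' maxf' : Int) (i' : Nat), rem'.toNat < rem.toNat →
      MinSpec (VB rem' maxf' i') (bestOpt rem' maxf' i'))
    (hrem : 1 ≤ rem) :
    ∀ (ds : List {x // x ∈ divScan rem 1}) (res : Option Int) (P0 : Int → Prop),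
      MinSpec P0 res →
      MinSpec (fun x => P0 x ∨ ∃ d ∈ ds, QB rem maxf i d.1 x) (bestLoop rem maxf i ds res) := by
  intro ds
  induction ds with
  | nil =>
    intro res P0 h0
    rw [bestLoop]
    exact minSpec_or_empty (by simp) h0
  | cons f rest ih =>
    intro res P0 h0
    rw [bestLoop]
    by_cases hcond : 2 ≤ f.1 ∧ f.1 ≤ maxf
    · rw [dif_pos hcond]
      have hsub := IH (PySem.Int.floordiv rem f.1) f.1 (i + 1)
        (pv_floordiv_toNat_lt rem f.1 hrem hcond.1)
      cases hb : bestOpt (PySem.Int.floordiv rem f.1) f.1 (i + 1) with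
      | none =>
        rw [hb] at hsub
        have hQ : ∀ x, ¬ QB rem maxf i f.1 x := by
          rintro x ⟨_, y, hy, _⟩
          exact hsub y hy
        refine minSpec_iff (fun x => ?_) (ih res P0 h0)
        simp only [List.mem_cons]
        constructor
        · rintro (hp | ⟨d, hd, hq⟩)
          · exact Or.inl hp
          · exact Or.inr ⟨d, Or.inr hd, hq⟩
        · rintro (hp | ⟨d, (rfl | hd), hq⟩)
          · exact Or.inl hp
          · exact absurd hq (hQ x)
          · exact Or.inr ⟨d, hd, hq⟩
      | some sv =>
        rw [hb] at hsub
        have hc0 : (0:Int) ≤ P32.getD i 0 ^ (f.1 - 1).toNat :=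
          pow_nonneg (pv_P32_getD_nonneg i) _
        have hscale := minSpec_scale (P32.getD i 0 ^ (f.1 - 1).toNat) hc0 hsub
        have hcomb := minSpec_combine h0 hscale
        have hcomb' : MinSpec (fun x => P0 x ∨ QB rem maxf i f.1 x)
            (optMin res (P32.getD i 0 ^ (f.1 - 1).toNat * sv)) := by
          refine minSpec_iff (fun x => ?_) hcomb
          simp only [QB]
          tauto
        refine minSpec_iff (fun x => ?_) (ih _ _ hcomb')
        simp only [List.mem_cons]
        constructor
        · rintro ((hp | hq) | ⟨d, hd, hq⟩)
          · exact Or.inl hp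
          · exact Or.inr ⟨f, Or.inl rfl, hq⟩
          · exact Or.inr ⟨d, Or.inr hd, hq⟩
        · rintro (hp | ⟨d, (rfl | hd), hq⟩)
          · exact Or.inl (Or.inl hp)
          · exact Or.inl (Or.inr hq)
          · exact Or.inr ⟨d, hd, hq⟩
    · rw [dif_neg hcond]
      have hQ : ∀ x, ¬ QB rem maxf i f.1 x := by
        rintro x ⟨hcc, _⟩
        exact hcond hcc
      refine minSpec_iff (fun x => ?_) (ih res P0 h0)
      simp only [List.mem_cons]
      constructor
      · rintro (hp | ⟨d, hd, hq⟩)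
        · exact Or.inl hp
        · exact Or.inr ⟨d, Or.inr hd, hq⟩
      · rintro (hp | ⟨d, (rfl | hd), hq⟩)
        · exact Or.inl hp
        · exact absurd hq (hQ x)
        · exact Or.inr ⟨d, hd, hq⟩

theorem vb_decompose (rem maxf : Int) (i : Nat) (hrem : ¬ rem = 1) (x : Int) :
    ((∃ f ∈ divScan rem 1, QB rem maxf i f x) ↔ VB rem maxf i x) := by
  constructor
  · rintro ⟨f, hfmem, ⟨⟨hf2, hfmax⟩, y, ⟨f', hprod, hpw, hall, rfl⟩, rfl⟩⟩
    have hr1 : 1 ≤ rem := divScan_pos rem 1 f hfmem (by norm_num)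
    rcases (divScan_mem rem 1 (by norm_num) f).1 hfmem with ⟨hdvd, _, _⟩
    rw [PySem.Int.floordiv_eq_ediv_of_pos (by omega : (0:Int) < f)] at hprod
    refine ⟨f :: f', ?_, ?_, ?_, ?_⟩
    · rw [List.prod_cons, hprod]
      exact Int.mul_ediv_cancel' hdvd
    · exact List.pairwise_cons.2 ⟨fun z hz => (hall z hz).2, hpw⟩
    · intro z hz
      rcases List.mem_cons.1 hz with rfl | hz
      · exact ⟨hf2, hfmax⟩
      · exact ⟨(hall z hz).1, le_trans (hall z hz).2 hfmax⟩
    · simp [valP]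
  · rintro ⟨F, hprod, hpw, hall, rfl⟩
    cases F with
    | nil => simp at hprod; omega
    | cons f f' =>
      have hf2 : 2 ≤ f := (hall f (by simp)).1
      have hfmax : f ≤ maxf := (hall f (by simp)).2
      have hall' : ∀ z ∈ f', z ≤ f := (List.pairwise_cons.1 hpw).1
      have hp' : 1 ≤ f'.prod :=
        pv_one_le_prod f' (fun z hz => by have := (hall z (by simp [hz])).1; omega)
      rw [List.prod_cons] at hprod
      have hrem2 : 2 ≤ rem := by nlinarith
      have hdvd : f ∣ rem := ⟨f'.prod, hprod.symm⟩
      have hfr : f ≤ rem := Int.le_of_dvd (by omega) hdvd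
      have hfdiv : PySem.Int.floordiv rem f = f'.prod := by
        rw [PySem.Int.floordiv_eq_ediv_of_pos (by omega : (0:Int) < f), ← hprod]
        exact Int.mul_ediv_cancel_left f'.prod (by omega)
      refine ⟨f, (divScan_mem rem 1 (by norm_num) f).2 ⟨hdvd, by omega, by omega⟩,
        ⟨hf2, hfmax⟩, valP P32 (i + 1) f', ⟨f', ?_, ?_, ?_, rfl⟩, by simp [valP]⟩
      · rw [hfdiv]
      · exact (List.pairwise_cons.1 hpw).2
      · intro z hz
        exact ⟨(hall z (by simp [hz])).1, hall' z hz⟩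

theorem bestLoop_empty (rem maxf : Int) (i : Nat) (hr : rem ≤ 0) :
    ∀ (ds : List {x // x ∈ divScan rem 1}) (res : Option Int),
      bestLoop rem maxf i ds res = res := by
  intro ds
  induction ds with
  | nil => intro res; rw [bestLoop]
  | cons f rest ih =>
    intro res
    have := divScan_pos rem 1 f.1 f.2 (by norm_num)
    omega

theorem vb_one (maxf : Int) (i : Nat) : MinSpec (VB 1 maxf i) (some 1) := by
  have hiff : ∀ x, VB 1 maxf i x ↔ x = 1 := by
    intro x
    constructor
    · rintro ⟨F, hprod, _, hall, rfl⟩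
      cases F with
      | nil => simp [valP]
      | cons f f' =>
        have hf2 : 2 ≤ f := (hall f (by simp)).1
        have hp' : 1 ≤ f'.prod :=
          pv_one_le_prod f' (fun z hz => by have := (hall z (by simp [hz])).1; omega)
        rw [List.prod_cons] at hprod
        nlinarith
    · rintro rfl
      exact ⟨[], by simp, List.Pairwise.nil, by simp, by simp [valP]⟩
  refine ⟨(hiff 1).2 rfl, ?_⟩
  intro x hx
  rw [(hiff x).1 hx]

theorem bestOpt_minspec : ∀ (rem maxf : Int) (i : Nat),
    MinSpec (VB rem maxf i) (bestOpt rem maxf i) := by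
  suffices H : ∀ (n : Nat) (rem maxf : Int) (i : Nat), rem.toNat ≤ n →
      MinSpec (VB rem maxf i) (bestOpt rem maxf i) by
    intro rem maxf i
    exact H rem.toNat rem maxf i le_rfl
  intro n
  induction n with
  | zero =>
    intro rem maxf i h0
    have hr : rem ≤ 0 := by omega
    rw [bestOpt, if_neg (by omega), bestLoop_empty rem maxf i hr]
    intro x hx
    rcases hx with ⟨F, hprod, _, hall, rfl⟩
    have hp : 1 ≤ F.prod :=
      pv_one_le_prod F (fun z hz => by have := (hall z hz).1; omega)
    omega
  | succ n ihn =>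
    intro rem maxf i h0
    by_cases hr1 : rem = 1
    · subst hr1
      rw [bestOpt, if_pos rfl]
      exact vb_one maxf i
    · rw [bestOpt, if_neg hr1]
      by_cases hrp : 1 ≤ rem
      · have IH : ∀ (rem' maxf' : Int) (i' : Nat), rem'.toNat < rem.toNat →
            MinSpec (VB rem' maxf' i') (bestOpt rem' maxf' i') := by
          intro rem' maxf' i' hlt
          exact ihn rem' maxf' i' (by omega)
        have haux := bestLoop_aux rem maxf i IH hrp (divScan rem 1).attach none
          (fun _ => False) (by intro x hx; exact hx)
        refine minSpec_iff (fun x => ?_) haux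
        rw [← vb_decompose rem maxf i hr1 x]
        constructor
        · rintro (hx | ⟨d, _, hq⟩)
          · exact absurd hx not_false
          · exact ⟨d.1, d.2, hq⟩
        · rintro ⟨f, hf, hq⟩
          exact Or.inr ⟨⟨f, hf⟩, List.mem_attach _ _, hq⟩
      · have hr : rem ≤ 0 := by omega
        rw [bestLoop_empty rem maxf i hr]
        intro x hx
        rcases hx with ⟨F, hprod, _, hall, rfl⟩
        have hp : 1 ≤ F.prod :=
          pv_one_le_prod F (fun z hz => by have := (hall z hz).1; omega)
        omega

-- ---------- the sieve really yields the first bit_length(K) primes ----------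

set_option maxRecDepth 200000 in
set_option maxHeartbeats 2000000 in
theorem sieve_take : ∀ b : Nat, b < 33 → 1 ≤ b → sievePrimes b = P32.take b := by decide

-- ---------- final assembly ----------

theorem solve_eq_alt (K : Int) (hdom : Dom_solve K) (hpre : Pre_solve K) :
    solve K = solve_alt K := by
  by_cases hK1 : K = 1
  · subst hK1; rfl
  · have h1 : (1:Int) ≤ K := hpre
    have hdb : K ≤ 2147483648 := by
      have := of_decide_eq_true hdom
      exact this.2
    have hK0 : K ≠ 0 := by omega
    have hup := PySem.Int.two_pow_bitLength_le K hK0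
    have hKlt := PySem.Int.lt_two_pow_bitLength K
    set b := PySem.Int.bitLength K with hbdef
    have hNa : (K.natAbs : Int) = K := Int.natAbs_of_nonneg (by omega)
    have hb1 : 1 ≤ b := by
      by_contra hb0
      have hbz : b = 0 := by omega
      rw [hbz] at hKlt
      omega
    have hb32 : b ≤ 32 := by
      by_contra h33
      have hpow : (4294967296 : Nat) ≤ 2 ^ (b - 1) := by
        calc (4294967296 : Nat) = 2 ^ 32 := by norm_num
          _ ≤ 2 ^ (b - 1) := Nat.pow_le_pow_right (by norm_num) (by omega)
      have hNb : K.natAbs ≤ 2147483648 := by omega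
      omega
    have hsieve : sievePrimes b = P32.take b := sieve_take b (by omega) hb1
    have hlenP : (P32.take b).length = b := by
      rw [List.length_take, show P32.length = 32 from rfl]
      omega
    have Hpos : ∀ j, j < (P32.take b).length → 1 ≤ (P32.take b).getD j 0 := by
      intro j hj
      rw [hlenP] at hj
      rw [pv_take_getD b j hj]
      exact pv_P32_getD_pos j (by omega)
    have hKint : K < (2:Int) ^ b := by
      have : ((2 ^ b : Nat) : Int) = (2:Int) ^ b := by push_cast; ring
      omega
    have hGlen : ∀ t : List Int, GoodT 2 K t → t.length < b := by
      rintro t ⟨hprod, _, hall⟩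
      have h2p := pv_two_pow_len_le_prod t (fun y hy => hall y hy)
      rw [hprod] at h2p
      by_contra hge
      have : (2:Int) ^ b ≤ 2 ^ t.length := pow_le_pow_right₀ (by norm_num) (by omega)
      omega
    -- the initial stack entry and its invariant proof, exactly as in `solve`
    have hfactsLen : ∀ fs ∈ loopA [(K, ([] : List Int), (2 : Int))] []
        (by intro e he; simp at he; simp [he]), fs.length ≤ (P32.take b).length := by
      intro fs hfs
      rcases (loopA_mem _ _ _ fs).1 hfs with hx | ⟨e, he, t, hG, rfl⟩
      · simp at hx
      · simp only [List.mem_singleton] at he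
        subst he
        simp only [List.nil_append, List.length_reverse]
        rw [hlenP]
        exact le_of_lt (hGlen t hG)
    have hA0 := outerLoop_minspec (P32.take b) Hpos
      (loopA [(K, ([] : List Int), (2 : Int))] [] (by intro e he; simp at he; simp [he]))
      none (fun _ => False) hfactsLen (fun x hx => hx)
    have hiff : ∀ x, (False ∨ ∃ fs ∈ loopA [(K, ([] : List Int), (2 : Int))] []
        (by intro e he; simp at he; simp [he]), x = valP (P32.take b) 0 fs) ↔ VB K K 0 x := by
      intro x
      simp only [false_or]
      constructor
      · rintro ⟨fs, hfs, rfl⟩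
        rcases (loopA_mem _ _ _ fs).1 hfs with hx | ⟨e, he, t, hG, rfl⟩
        · simp at hx
        · simp only [List.mem_singleton] at he
          subst he
          rcases hG with ⟨hprod, hpw, hall⟩
          have hall' : ∀ y ∈ t, (2:Int) ≤ y := hall
          have hlt : t.length < b := hGlen t ⟨hprod, hpw, hall⟩
          simp only [List.nil_append]
          rw [pv_valP_take t.reverse 0 b (by simp; omega)]
          refine ⟨t.reverse, by simp [hprod], ?_, ?_, rfl⟩
          · exact List.pairwise_reverse.2 hpw
          · intro y hy
            rw [List.mem_reverse] at hy
            refine ⟨hall' y hy, ?_⟩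
            have := pv_elem_le_prod t (fun z hz => by have := hall' z hz; omega) y hy
            omega
      · rintro ⟨F, hprod, hpw, hall, rfl⟩
        have hG : GoodT 2 K F.reverse := by
          refine ⟨by simp [hprod], List.pairwise_reverse.2 hpw, ?_⟩
          intro y hy
          rw [List.mem_reverse] at hy
          exact (hall y hy).1
        have hlt : F.length < b := by
          have := hGlen F.reverse hG
          simpa using this
        refine ⟨F, ?_, ?_⟩
        · refine (loopA_mem _ _ _ F).2 (Or.inr ⟨(K, ([] : List Int), (2 : Int)), by simp,
            F.reverse, hG, by simp⟩)
        · rw [pv_valP_take F 0 b (by omega)]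
    have hA := minSpec_iff hiff hA0
    have hB := bestOpt_minspec K K 0
    have heq := minSpec_unique hA hB
    simp only [solve, solve_alt, if_neg hK1]
    rw [hsieve, heq]

-- ===== VERDICT (by name: the statement is the Claim_ definition above) =====
theorem solve_spec : Claim_equal_solve := by
  intro K hdom hpre
  exact solve_eq_alt K hdom hpre
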